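-- pv_equiv track=rewrite | github.com/PinchasKem/homework_mefatchim | menayot.py | calculate_price_streaks_efficient
-- ===== SOURCE A (Python) =====
-- def calculate_price_streaks_efficient(prices):
--
--     arr_consecutive_days = [1]*len(prices)
--     stack_list = [0]
--
--     for i in range(1, len(prices)):
--         while stack_list and prices[stack_list[-1]] <= prices[i]:
--             arr_consecutive_days[i] += arr_consecutive_days[stack_list.pop()]
--         stack_list.append(i)
--
--     return arr_consecutive_days
-- ===== SOURCE B (Python) =====
-- def calculate_price_streaks_efficient(prices):
--     result = []
--     for i in range(len(prices)):
--         count = 1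
--         j = i - 1
--         while j >= 0 and prices[j] <= prices[i]:
--             count += 1
--             j -= 1
--         result.append(count)
--     return result
-- ===== Notes on version B (the rewrite author's own statement) =====
-- stated objective: simpler
-- what changed: Replaced the monotonic stack and mutable span array with a direct nested backward scan: for each index, count consecutive previous prices <= prices[i] until the first strictly greater one.
import Mathlib
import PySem

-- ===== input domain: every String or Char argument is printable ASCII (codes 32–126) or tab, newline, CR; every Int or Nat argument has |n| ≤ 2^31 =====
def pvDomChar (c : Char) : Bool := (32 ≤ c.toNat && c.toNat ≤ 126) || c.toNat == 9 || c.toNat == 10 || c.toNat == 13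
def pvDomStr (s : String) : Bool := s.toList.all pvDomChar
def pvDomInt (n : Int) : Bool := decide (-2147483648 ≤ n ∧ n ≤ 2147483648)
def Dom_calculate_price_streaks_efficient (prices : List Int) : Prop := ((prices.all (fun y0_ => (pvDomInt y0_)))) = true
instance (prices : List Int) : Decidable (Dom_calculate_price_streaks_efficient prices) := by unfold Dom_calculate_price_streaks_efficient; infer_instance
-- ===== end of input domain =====

-- B replaces A's monotonic stack + mutable span array by a plain nested backward scan per index (simpler; same results).

-- ===== PORT A =====
-- inner `while stack_list and prices[stack_list[-1]] <= prices[i]` loop; stack head = Python stack_list[-1].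
-- All indexing is by loop indices that are always in range, so `getD _ 0` is exact here.
def pvPop (prices : List Int) (i : Nat) : List Int → List Nat → List Int × List Nat
  | arr, [] => (arr, [])
  | arr, t :: rest =>
    if prices.getD t 0 ≤ prices.getD i 0 then
      pvPop prices i (arr.set i (arr.getD i 0 + arr.getD t 0)) rest
    else (arr, t :: rest)

def calculate_price_streaks_efficient (prices : List Int) : List Int :=
  ((List.range' 1 (prices.length - 1)).foldl
    (fun st i =>
      let pr := pvPop prices i st.1 st.2
      (pr.1, i :: pr.2))
    (List.replicate prices.length (1 : Int), [0])).1

-- ===== PORT B =====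
-- the `while j >= 0 and prices[j] <= prices[i]` backward count, as recursion on j+1
def pvRun (prices : List Int) (x : Int) : Nat → Nat
  | 0 => 0
  | j+1 => if prices.getD j 0 ≤ x then pvRun prices x j + 1 else 0

def calculate_price_streaks_efficient_alt (prices : List Int) : List Int :=
  (List.range prices.length).map (fun i => (1 + pvRun prices (prices.getD i 0) i : Int))

-- ===== PRECONDITION & SPEC =====
def Spec_calculate_price_streaks_efficient (prices : List Int) (out : List Int) : Prop := out = calculate_price_streaks_efficient_alt prices
instance (prices : List Int) (out : List Int) : Decidable (Spec_calculate_price_streaks_efficient prices out) := by unfold Spec_calculate_price_streaks_efficient; infer_instance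

-- ===== CLAIM (what is proved, stated in full; the proofs are below) =====
def Claim_equal_calculate_price_streaks_efficient : Prop := ∀ (prices : List Int), Dom_calculate_price_streaks_efficient prices → Spec_calculate_price_streaks_efficient prices (calculate_price_streaks_efficient prices)

-- ===== LEMMAS AND PROOFS =====

-- span of index i = B's value there
def pvSpan (p : List Int) (i : Nat) : Nat := pvRun p (p.getD i 0) i + 1

-- A's stack is a chain: head t, next element is t - span t, bottom reaches -1
def pvInv (p : List Int) : Int → List Nat → Prop
  | e, [] => e = -1
  | e, t :: rest => (t : Int) = e ∧ pvInv p ((t : Int) - (pvSpan p t : Int)) rest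

-- the array after processing indices 1..m-1: entries < m are finished spans, the rest still 1
def pvArr (p : List Int) (m : Nat) : List Int :=
  (List.range p.length).map (fun k => if k < m then (pvSpan p k : Int) else 1)

lemma pvRun_le (p : List Int) (x : Int) : ∀ k, pvRun p x k ≤ k := by
  intro k
  induction k with
  | zero => simp [pvRun]
  | succ j ih => simp only [pvRun]; split <;> omega

-- telescoping: a run for x ≥ y first consumes the whole run for y, then continues
lemma pvRun_skip (p : List Int) (x y : Int) (hxy : y ≤ x) :
    ∀ k, pvRun p x k = pvRun p y k + pvRun p x (k - pvRun p y k) := by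
  intro k
  induction k with
  | zero => simp [pvRun]
  | succ j ih =>
    by_cases h : p.getD j 0 ≤ y
    · have hx : p.getD j 0 ≤ x := le_trans h hxy
      have hle := pvRun_le p y j
      simp only [pvRun, if_pos h, if_pos hx]
      have heq : j + 1 - (pvRun p y j + 1) = j - pvRun p y j := by omega
      rw [heq]
      omega
    · simp only [pvRun, if_neg h, Nat.zero_add, Nat.sub_zero]

lemma pvSpan_pos (p : List Int) (t : Nat) : 1 ≤ pvSpan p t := by
  unfold pvSpan; omega

lemma pvSpan_le (p : List Int) (t : Nat) : pvSpan p t ≤ t + 1 := by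
  have := pvRun_le p (p.getD t 0) t
  unfold pvSpan; omega

lemma pvRun_succ_self (p : List Int) (t : Nat) :
    pvRun p (p.getD t 0) (t + 1) = pvSpan p t := by
  unfold pvSpan
  simp only [pvRun, if_pos (le_refl (p.getD t 0))]

lemma pvInv_mem_le (p : List Int) : ∀ (st : List Nat) (e : Int), pvInv p e st →
    ∀ t ∈ st, (t : Int) ≤ e := by
  intro st
  induction st with
  | nil => intro e _ t ht; simp at ht
  | cons a rest ih =>
    intro e h t ht
    obtain ⟨h1, h2⟩ := h
    rcases List.mem_cons.mp ht with rfl | hm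
    · omega
    · have hle : (t : Int) ≤ (a : Int) - (pvSpan p a : Int) := ih _ h2 t hm
      have hs : 1 ≤ (pvSpan p a : Int) := by exact_mod_cast pvSpan_pos p a
      omega

lemma pvSet_getD_self (l : List Int) (i : Nat) (v : Int) (h : i < l.length) :
    (l.set i v).getD i 0 = v := by
  simp [List.getD_eq_getElem?_getD, h]

lemma pvGetD_set_ne (l : List Int) (i k : Nat) (v : Int) (h : k ≠ i) :
    (l.set i v).getD k 0 = l.getD k 0 := by
  simp [List.getD_eq_getElem?_getD, List.getElem?_set_ne (Ne.symm h)]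

lemma pvSet_self (l : List Int) (i : Nat) (h : i < l.length) :
    l.set i (l.getD i 0) = l := by
  rw [List.getD_eq_getElem l 0 h, List.set_getElem_self]

-- main pop lemma: popping a chain adds exactly the continuing backward run to arr[i]
lemma pvPop_main (p : List Int) (i : Nat) :
    ∀ (st : List Nat) (e : Int) (arr : List Int),
      pvInv p e st → i < arr.length → e < (i : Int) →
      (∀ t ∈ st, arr.getD t 0 = (pvSpan p t : Int)) →
      ∃ st',
        pvPop p i arr st =
          (arr.set i (arr.getD i 0 + (pvRun p (p.getD i 0) (e + 1).toNat : Int)), st') ∧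
        pvInv p (e - (pvRun p (p.getD i 0) (e + 1).toNat : Int)) st' := by
  intro st
  induction st with
  | nil =>
    intro e arr hinv hlen _ _
    have he : e = -1 := hinv
    subst he
    have h0 : ((-1 : Int) + 1).toNat = 0 := by decide
    rw [h0]
    refine ⟨[], ?_, by show (-1 : Int) - _ = -1; simp [pvRun]⟩
    simp only [pvPop, pvRun, Nat.cast_zero, add_zero]
    rw [pvSet_self arr i hlen]
  | cons t rest ih =>
    intro e arr hinv hlen hei hmem
    obtain ⟨h1, h2⟩ := hinv
    have het : (e + 1).toNat = t + 1 := by omega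
    rw [het]
    by_cases hc : p.getD t 0 ≤ p.getD i 0
    · -- pop t and recurse
      have hti : t ≠ i := by omega
      have harrt : arr.getD t 0 = (pvSpan p t : Int) := hmem t (List.mem_cons_self ..)
      have hlen' : i < (arr.set i (arr.getD i 0 + arr.getD t 0)).length := by
        simpa using hlen
      have hspan_le : pvSpan p t ≤ t + 1 := pvSpan_le p t
      have hs1 : (1 : Int) ≤ (pvSpan p t : Int) := by exact_mod_cast pvSpan_pos p t
      have hsle : (pvSpan p t : Int) ≤ (t : Int) + 1 := by exact_mod_cast hspan_le
      have he'i : (t : Int) - (pvSpan p t : Int) < (i : Int) := by omega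
      have hmem' : ∀ u ∈ rest,
          (arr.set i (arr.getD i 0 + arr.getD t 0)).getD u 0 = (pvSpan p u : Int) := by
        intro u hu
        have hule : (u : Int) ≤ (t : Int) - (pvSpan p t : Int) := pvInv_mem_le p rest _ h2 u hu
        have hui : u ≠ i := by omega
        rw [pvGetD_set_ne _ _ _ _ hui]
        exact hmem u (List.mem_cons_of_mem _ hu)
      obtain ⟨st', heq, hinv'⟩ :=
        ih ((t : Int) - (pvSpan p t : Int)) (arr.set i (arr.getD i 0 + arr.getD t 0)) h2 hlen' he'i hmem'
      have hnt : ((t : Int) - (pvSpan p t : Int) + 1).toNat = t + 1 - pvSpan p t := by omega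
      rw [hnt] at heq hinv'
      have hskip := pvRun_skip p (p.getD i 0) (p.getD t 0) hc (t + 1)
      rw [pvRun_succ_self p t] at hskip
      refine ⟨st', ?_, ?_⟩
      · simp only [pvPop, if_pos hc]
        rw [heq, List.set_set, pvSet_getD_self _ _ _ hlen, harrt, hskip]
        congr 2
        push_cast
        ring
      · rw [hskip]
        have hee : e - ((pvSpan p t + pvRun p (p.getD i 0) (t + 1 - pvSpan p t) : Nat) : Int)
            = (t : Int) - (pvSpan p t : Int) - (pvRun p (p.getD i 0) (t + 1 - pvSpan p t) : Int) := by
          push_cast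
          omega
        rw [hee]
        exact hinv'
    · -- stop: top of the stack is strictly greater
      have hr0 : pvRun p (p.getD i 0) (t + 1) = 0 := by
        simp only [pvRun, if_neg hc]
      refine ⟨t :: rest, ?_, ?_⟩
      · rw [hr0]
        simp only [pvPop, if_neg hc, Nat.cast_zero, add_zero]
        rw [pvSet_self arr i hlen]
      · rw [hr0]
        simpa using ⟨h1, h2⟩

lemma pvArr_getD (p : List Int) (m k : Nat) (hk : k < p.length) :
    (pvArr p m).getD k 0 = if k < m then (pvSpan p k : Int) else 1 := by
  simp [pvArr, List.getD_eq_getElem?_getD, hk]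

lemma pvArr_length (p : List Int) (m : Nat) : (pvArr p m).length = p.length := by
  simp [pvArr]

lemma pvArr_set (p : List Int) (m : Nat) (hm : m < p.length) :
    (pvArr p m).set m (pvSpan p m : Int) = pvArr p (m + 1) := by
  apply List.ext_getElem
  · simp [pvArr]
  · intro k h1 h2
    have hk : k < p.length := by simpa [pvArr] using h2
    rw [List.getElem_set]
    simp only [pvArr, List.getElem_map, List.getElem_range]
    by_cases hmk : m = k
    · subst hmk
      rw [if_pos rfl, if_pos (Nat.lt_succ_self m)]
    · rw [if_neg hmk]
      by_cases hkm : k < m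
      · rw [if_pos hkm, if_pos (by omega)]
      · rw [if_neg hkm, if_neg (by omega)]

lemma pvFold_main (p : List Int) :
    ∀ m, m + 1 ≤ p.length →
      ∃ st,
        ((List.range' 1 m).foldl
          (fun st i =>
            let pr := pvPop p i st.1 st.2
            (pr.1, i :: pr.2))
          (List.replicate p.length (1 : Int), [0])) = (pvArr p (m + 1), st) ∧
        pvInv p (m : Int) st := by
  intro m
  induction m with
  | zero =>
    intro _
    refine ⟨[0], ?_, rfl, ?_⟩
    · simp only [List.range'_zero, List.foldl_nil]
      congr 1
      apply List.ext_getElem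
      · simp [pvArr]
      · intro k h1 h2
        simp only [pvArr, List.getElem_replicate, List.getElem_map, List.getElem_range]
        by_cases hk : k < 1
        · have hk0 : k = 0 := by omega
          subst hk0
          rw [if_pos hk]
          simp [pvSpan, pvRun]
        · rw [if_neg hk]
    · show ((0 : Nat) : Int) - (pvSpan p 0 : Int) = -1
      have hsp : pvSpan p 0 = 1 := rfl
      rw [hsp]
      decide
  | succ m ih =>
    intro hm
    obtain ⟨st, heq, hinv⟩ := ih (by omega)
    have hconcat : List.range' 1 (m + 1) = List.range' 1 m ++ [m + 1] := by
      rw [List.range'_concat, Nat.one_mul, Nat.add_comm 1 m]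
    rw [hconcat, List.foldl_append, heq]
    have hi : m + 1 < p.length := by omega
    have hlen : m + 1 < (pvArr p (m + 1)).length := by rw [pvArr_length]; exact hi
    have hmem : ∀ t ∈ st, (pvArr p (m + 1)).getD t 0 = (pvSpan p t : Int) := by
      intro t htm
      have hle := pvInv_mem_le p st _ hinv t htm
      have htlt : t < m + 1 := by omega
      rw [pvArr_getD p (m + 1) t (by omega), if_pos htlt]
    have hei : (m : Int) < ((m + 1 : Nat) : Int) := by push_cast; omega
    obtain ⟨st', hpop, hinv'⟩ :=
      pvPop_main p (m + 1) st (m : Int) (pvArr p (m + 1)) hinv hlen hei hmem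
    have hnt : ((m : Int) + 1).toNat = m + 1 := by omega
    rw [hnt] at hpop hinv'
    have ha : (pvArr p (m + 1)).getD (m + 1) 0 = 1 := by
      rw [pvArr_getD p (m + 1) (m + 1) hi, if_neg (lt_irrefl _)]
    refine ⟨(m + 1) :: st', ?_, ?_⟩
    · simp only [List.foldl_cons, List.foldl_nil]
      show (let pr := pvPop p (m + 1) (pvArr p (m + 1)) st; (pr.1, (m + 1) :: pr.2)) = _
      rw [hpop]
      show (_, (m + 1) :: st') = _
      rw [ha]
      have hv : (1 : Int) + (pvRun p (p.getD (m + 1) 0) (m + 1) : Int) = (pvSpan p (m + 1) : Int) := by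
        unfold pvSpan
        push_cast
        ring
      rw [hv, pvArr_set p (m + 1) hi]
    · refine ⟨rfl, ?_⟩
      have hsp : ((m + 1 : Nat) : Int) - (pvSpan p (m + 1) : Int)
          = (m : Int) - (pvRun p (p.getD (m + 1) 0) (m + 1) : Int) := by
        unfold pvSpan
        push_cast
        ring
      rw [hsp]
      exact hinv'

lemma pvMain (p : List Int) :
    calculate_price_streaks_efficient p = calculate_price_streaks_efficient_alt p := by
  rcases Nat.eq_zero_or_pos p.length with h0 | hpos
  · unfold calculate_price_streaks_efficient calculate_price_streaks_efficient_alt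
    simp [h0]
  · have hm : (p.length - 1) + 1 ≤ p.length := by omega
    obtain ⟨st, heq, _⟩ := pvFold_main p (p.length - 1) hm
    unfold calculate_price_streaks_efficient
    rw [heq]
    have hn : (p.length - 1) + 1 = p.length := by omega
    rw [hn]
    unfold calculate_price_streaks_efficient_alt pvArr
    apply List.map_congr_left
    intro k hk
    have hkn : k < p.length := List.mem_range.mp hk
    rw [if_pos hkn]
    unfold pvSpan
    push_cast
    ring

-- ===== VERDICT (by name: the statement is the Claim_ definition above) =====
theorem calculate_price_streaks_efficient_spec : Claim_equal_calculate_price_streaks_efficient := by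
  intro p _
  show _ = _
  exact pvMain p
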